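-- pv_equiv track=rewrite | github.com/natnij/simpleOR | simpleor/supports/data_loader.py | alignColNames
-- ===== SOURCE A (Python) =====
-- def alignColNames(oldColn, newColn):
--     """uitility函数，对齐字段名称"""
--     matchCol = dict()
--     newColn = sorted(newColn, key=len, reverse=True)
--     for oldc in oldColn:
--         newc = [x for x in newColn if x.lower() in oldc.lower()]
--         if len(newc) > 0:
--             matchCol[oldc] = newc[0]
--     return matchCol
-- ===== SOURCE B (Python) =====
-- def alignColNames(oldColn, newColn):
--     """uitility函数，对齐字段名称"""
--     matchCol = {}
--     for oldc in oldColn: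
--         o = oldc.lower()
--         best = None
--         for newc in newColn:
--             if (best is None or len(newc) > len(best)) and newc.lower() in o:
--                 best = newc
--         if best is not None:
--             matchCol[oldc] = best
--     return matchCol
-- ===== Notes on version B (the rewrite author's own statement) =====
-- stated objective: alternative
-- what changed: B drops the length-descending sort and the per-column candidate-list materialization: for each old column it makes one max-tracking pass over the unsorted new names, keeping the first longest matching name (strictly-longer-replaces reproduces the stable sort's tie-breaking).
import Mathlib
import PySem

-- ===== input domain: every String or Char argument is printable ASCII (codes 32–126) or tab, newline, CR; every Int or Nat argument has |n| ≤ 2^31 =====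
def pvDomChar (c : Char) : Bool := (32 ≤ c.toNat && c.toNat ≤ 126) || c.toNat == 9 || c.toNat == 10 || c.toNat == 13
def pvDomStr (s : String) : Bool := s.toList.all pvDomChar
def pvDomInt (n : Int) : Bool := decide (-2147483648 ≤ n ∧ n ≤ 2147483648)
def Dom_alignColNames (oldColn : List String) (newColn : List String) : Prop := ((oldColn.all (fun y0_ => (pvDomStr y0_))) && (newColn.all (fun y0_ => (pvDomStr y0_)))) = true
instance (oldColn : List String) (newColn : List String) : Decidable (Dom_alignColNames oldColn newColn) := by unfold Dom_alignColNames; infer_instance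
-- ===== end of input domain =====

-- B replaces A's sort-then-filter-then-take-head with a single max-tracking pass over the
-- unsorted new names per old name (same values, including tie-breaking); alternative algorithm.

-- ===== PORT A =====
def alignColNames (oldColn : List String) (newColn : List String) : List (String × String) :=
  let newSorted := PySem.List.sorted newColn PySem.Str.len true
  (oldColn.foldl (fun (d : PySem.Dict String String) oldc =>
      let newc := newSorted.filter (fun x => PySem.Str.isIn (PySem.Str.lower x) (PySem.Str.lower oldc))
      match newc with
      | [] => d
      | n :: _ => d.insert oldc n)
    PySem.Dict.empty).items

-- ===== PORT B =====
-- inner loop of Source B: best match so far, strictly-longer-and-matching replaces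
def pvBest (o : String) (newColn : List String) : Option String :=
  newColn.foldl (fun best newc =>
    if ((match best with
         | none => true
         | some b => decide (PySem.Str.len b < PySem.Str.len newc))
        && PySem.Str.isIn (PySem.Str.lower newc) o) then some newc else best) none

def alignColNames_alt (oldColn : List String) (newColn : List String) : List (String × String) :=
  (oldColn.foldl (fun (d : PySem.Dict String String) oldc =>
      let o := PySem.Str.lower oldc
      match pvBest o newColn with
      | none => d
      | some b => d.insert oldc b)
    PySem.Dict.empty).items

-- ===== PRECONDITION & SPEC =====
def Spec_alignColNames (oldColn : List String) (newColn : List String) (out : List (String × String)) : Prop := out = alignColNames_alt oldColn newColn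
instance (oldColn : List String) (newColn : List String) (out : List (String × String)) : Decidable (Spec_alignColNames oldColn newColn out) := by unfold Spec_alignColNames; infer_instance

-- ===== CLAIM (what is proved, stated in full; the proofs are below) =====
def Claim_equal_alignColNames : Prop := ∀ (oldColn : List String) (newColn : List String), Dom_alignColNames oldColn newColn → Spec_alignColNames oldColn newColn (alignColNames oldColn newColn)

-- ===== LEMMAS AND PROOFS =====

-- the "before" predicate of PySem's stable reverse sort with key = len
def pvBef (a b : String) : Bool := decide (PySem.Str.len b < PySem.Str.len a)

-- one fold step of pvBest
def pvStep (o : String) (best : Option String) (newc : String) : Option String :=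
  if ((match best with
       | none => true
       | some b => decide (PySem.Str.len b < PySem.Str.len newc))
      && PySem.Str.isIn (PySem.Str.lower newc) o) then some newc else best

lemma pvBest_eq_foldl (o : String) (xs : List String) :
    pvBest o xs = xs.foldl (pvStep o) none := rfl

lemma pvBef_lt {x y : String} (h : pvBef x y = true) : PySem.Str.len y < PySem.Str.len x := by
  simpa [pvBef] using h

lemma pvBef_ge {x y : String} (h : pvBef x y = false) : PySem.Str.len x ≤ PySem.Str.len y := by
  have h' : ¬ PySem.Str.len y < PySem.Str.len x := of_decide_eq_false (by simpa [pvBef] using h)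
  exact not_lt.mp h' 

lemma pvStep_false (o x : String) (best : Option String)
    (hp : PySem.Str.isIn (PySem.Str.lower x) o = false) : pvStep o best x = best := by
  simp only [pvStep, hp, Bool.and_false, Bool.false_eq_true, if_false]

lemma pvStep_none_true (o x : String)
    (hp : PySem.Str.isIn (PySem.Str.lower x) o = true) : pvStep o none x = some x := by
  simp only [pvStep, hp, Bool.and_true]
  exact if_pos trivial

lemma pvStep_some_lt (o x b : String)
    (hp : PySem.Str.isIn (PySem.Str.lower x) o = true)
    (hlt : PySem.Str.len b < PySem.Str.len x) : pvStep o (some b) x = some x := by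
  simp only [pvStep, hp, Bool.and_true]
  rw [if_pos (decide_eq_true hlt)]

lemma pvStep_some_ge (o x b : String)
    (hle : PySem.Str.len x ≤ PySem.Str.len b) : pvStep o (some b) x = some b := by
  have hd : decide (PySem.Str.len b < PySem.Str.len x) = false :=
    decide_eq_false (not_lt.mpr hle)
  simp only [pvStep, hd, Bool.false_and, Bool.false_eq_true, if_false]

lemma insertBy_pairwise (x : String) (acc : List String)
    (h : acc.Pairwise (fun a b => PySem.Str.len b ≤ PySem.Str.len a)) :
    (PySem.List.insertBy pvBef x acc).Pairwise (fun a b => PySem.Str.len b ≤ PySem.Str.len a) := by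
  induction acc with
  | nil => simp [PySem.List.insertBy]
  | cons y ys ih =>
    rcases List.pairwise_cons.mp h with ⟨hy, hys⟩
    cases hb : pvBef x y with
    | true =>
      have hxy := pvBef_lt hb
      simp only [PySem.List.insertBy, hb, if_true]
      refine List.pairwise_cons.mpr ⟨?_, h⟩
      intro z hz
      rcases List.mem_cons.mp hz with rfl | hz
      · exact le_of_lt hxy
      · exact le_trans (hy z hz) (le_of_lt hxy)
    | false =>
      have hxy := pvBef_ge hb
      simp only [PySem.List.insertBy, hb, Bool.false_eq_true, if_false]
      refine List.pairwise_cons.mpr ⟨?_, ih hys⟩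
      intro z hz
      rcases (PySem.List.mem_insertBy pvBef x z ys).mp hz with rfl | hz
      · exact hxy
      · exact hy z hz

lemma step_insertBy (o : String) (x : String) (acc : List String)
    (h : acc.Pairwise (fun a b => PySem.Str.len b ≤ PySem.Str.len a)) :
    ((PySem.List.insertBy pvBef x acc).filter
        (fun z => PySem.Str.isIn (PySem.Str.lower z) o)).head?
      = pvStep o ((acc.filter (fun z => PySem.Str.isIn (PySem.Str.lower z) o)).head?) x := by
  induction acc with
  | nil =>
    cases hp : PySem.Str.isIn (PySem.Str.lower x) o with
    | true =>
      simp only [PySem.List.insertBy, List.filter_cons, List.filter_nil, hp, if_true,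
        List.head?_cons, List.head?_nil]
      exact (pvStep_none_true o x hp).symm
    | false =>
      simp only [PySem.List.insertBy, List.filter_cons, List.filter_nil, hp,
        Bool.false_eq_true, if_false, List.head?_nil]
      exact (pvStep_false o x none hp).symm
  | cons y ys ih =>
    rcases List.pairwise_cons.mp h with ⟨hy, hys⟩
    cases hb : pvBef x y with
    | true =>
      have hxy := pvBef_lt hb
      simp only [PySem.List.insertBy, hb, if_true]
      cases hp : PySem.Str.isIn (PySem.Str.lower x) o with
      | true =>
        simp only [List.filter_cons (x := x), hp, if_true, List.head?_cons]
        cases hhead : ((y :: ys).filter (fun z => PySem.Str.isIn (PySem.Str.lower z) o)).head? with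
        | none => exact (pvStep_none_true o x hp).symm
        | some b =>
          have hbmem : b ∈ (y :: ys) := by
            have : b ∈ (y :: ys).filter (fun z => PySem.Str.isIn (PySem.Str.lower z) o) :=
              List.mem_of_mem_head? (Option.mem_def.mpr hhead)
            exact (List.mem_filter.mp this).1
          have hble : PySem.Str.len b ≤ PySem.Str.len y := by
            rcases List.mem_cons.mp hbmem with rfl | hmem
            · exact le_refl _
            · exact hy b hmem
          exact (pvStep_some_lt o x b hp (lt_of_le_of_lt hble hxy)).symm
      | false =>
        simp only [List.filter_cons (x := x), hp, Bool.false_eq_true, if_false]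
        exact (pvStep_false o x _ hp).symm
    | false =>
      have hxy := pvBef_ge hb
      simp only [PySem.List.insertBy, hb, Bool.false_eq_true, if_false]
      cases hpy : PySem.Str.isIn (PySem.Str.lower y) o with
      | true =>
        simp only [List.filter_cons (x := y), hpy, if_true, List.head?_cons]
        exact (pvStep_some_ge o x y hxy).symm
      | false =>
        simp only [List.filter_cons (x := y), hpy, Bool.false_eq_true, if_false]
        exact ih hys

lemma foldl_insertBy_inv (o : String) (xs : List String) :
    ∀ (acc : List String),
      acc.Pairwise (fun a b => PySem.Str.len b ≤ PySem.Str.len a) →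
      ((xs.foldl (fun acc x => PySem.List.insertBy pvBef x acc) acc).filter
          (fun z => PySem.Str.isIn (PySem.Str.lower z) o)).head?
        = xs.foldl (pvStep o) ((acc.filter (fun z => PySem.Str.isIn (PySem.Str.lower z) o)).head?) := by
  induction xs with
  | nil => intro acc _; simp
  | cons x xs ih =>
    intro acc hacc
    simp only [List.foldl_cons]
    rw [ih _ (insertBy_pairwise x acc hacc), step_insertBy o x acc hacc]

-- the key fact: head of the filter over the stable length-descending sort = B's max-tracking pass
lemma head_filter_sorted_eq_pvBest (o : String) (xs : List String) :
    ((PySem.List.sorted xs PySem.Str.len true).filter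
        (fun z => PySem.Str.isIn (PySem.Str.lower z) o)).head?
      = pvBest o xs := by
  have hbef : (fun a b : String => decide (PySem.Str.len b < PySem.Str.len a)) = pvBef := rfl
  rw [PySem.List.sorted_rev_eq_foldl_insertBy xs PySem.Str.len, pvBest_eq_foldl, hbef]
  simpa using foldl_insertBy_inv o xs [] (by simp)

theorem alignColNames_spec : Claim_equal_alignColNames := by
  intro oldColn newColn _
  unfold Spec_alignColNames alignColNames alignColNames_alt
  have hstep : (fun (d : PySem.Dict String String) oldc =>
      match (PySem.List.sorted newColn PySem.Str.len true).filter
          (fun x => PySem.Str.isIn (PySem.Str.lower x) (PySem.Str.lower oldc)) with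
      | [] => d
      | n :: _ => d.insert oldc n)
      = (fun (d : PySem.Dict String String) oldc =>
      match pvBest (PySem.Str.lower oldc) newColn with
      | none => d
      | some b => d.insert oldc b) := by
    funext d oldc
    have hkey := head_filter_sorted_eq_pvBest (PySem.Str.lower oldc) newColn
    cases hf : (PySem.List.sorted newColn PySem.Str.len true).filter
        (fun x => PySem.Str.isIn (PySem.Str.lower x) (PySem.Str.lower oldc)) with
    | nil => rw [hf] at hkey; simp at hkey; simp [← hkey]
    | cons n t => rw [hf] at hkey; simp at hkey; simp [← hkey]
  simp only [hstep]
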